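-- pv_equiv track=rewrite | github.com/AhmedJarraya999/LeetCode-Daily-Solutions | 3197-find-the-minimum-area-to-cover-all-ones-ii/3197-find-the-minimum-area-to-cover-all-ones-ii.py | findBoundingCoordinates
-- ===== SOURCE A (Python) =====
-- from typing import List
--
-- def findBoundingCoordinates(grid: List[List[int]]):
--     m, n = len(grid), len(grid[0])
--     low_x, high_x = float('inf'), -1
--     low_y, high_y = float('inf'), -1
--     for i in range(m):
--         for j in range(n):
--             if grid[i][j] == 1:
--                 low_x = min(low_x, i)
--                 high_x = max(high_x, i)
--                 low_y = min(low_y, j)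
--                 high_y = max(high_y, j)
--     if high_x == -1:
--         return None
--     return (low_x, high_x, low_y, high_y)
-- ===== SOURCE B (Python) =====
-- def findBoundingCoordinates(grid):
--     m, n = len(grid), len(grid[0])
--     coords = [(i, j) for i in range(m) for j in range(n) if grid[i][j] == 1]
--     if not coords:
--         return None
--     rows = [i for i, _ in coords]
--     cols = [j for _, j in coords]
--     return (min(rows), max(rows), min(cols), max(cols))
-- ===== Notes on version B (the rewrite author's own statement) =====
-- stated objective: simpler
-- what changed: A interleaves four running-extrema updates with an inf sentinel inside nested index loops; B gathers all 1-coordinates in one comprehension and, if any, reduces the row and column lists with min/max.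
import Mathlib
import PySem

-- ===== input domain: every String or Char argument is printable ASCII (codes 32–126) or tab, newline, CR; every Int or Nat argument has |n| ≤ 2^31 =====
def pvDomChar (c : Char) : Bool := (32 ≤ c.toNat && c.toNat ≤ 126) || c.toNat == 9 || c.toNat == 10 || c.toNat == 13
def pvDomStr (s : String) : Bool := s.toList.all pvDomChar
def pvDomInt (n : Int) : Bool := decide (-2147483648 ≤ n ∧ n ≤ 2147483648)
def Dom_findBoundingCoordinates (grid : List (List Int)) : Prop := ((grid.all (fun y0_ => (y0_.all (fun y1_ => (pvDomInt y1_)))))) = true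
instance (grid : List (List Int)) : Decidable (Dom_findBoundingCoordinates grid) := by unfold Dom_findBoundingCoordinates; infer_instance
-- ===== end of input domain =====

-- B gathers the 1-coordinates in one comprehension and reduces with min/max instead of A's
-- interleaved running-extrema loop with an inf sentinel (objective: simpler decomposition).

-- ===== PORT A =====
-- float('inf') is modelled as `none : Option Int`: min(inf, i) = i, min(some x, i) = min x i.
def fbcMin (o : Option Int) (i : Int) : Option Int :=
  match o with
  | none => some i
  | some x => some (min x i)

def findBoundingCoordinates (grid : List (List Int)) : Option (Int × Int × Int × Int) :=
  let m : Int := grid.length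
  let n : Int := (PySem.List.pyGetD grid 0 []).length
  let st := (PySem.List.pyRange 0 m 1).foldl (fun st i =>
      (PySem.List.pyRange 0 n 1).foldl (fun st j =>
        if PySem.List.pyGetD (PySem.List.pyGetD grid i []) j 0 = 1 then
          (fbcMin st.1 i, max st.2.1 i, fbcMin st.2.2.1 j, max st.2.2.2 j)
        else st) st)
    ((none : Option Int), (-1 : Int), (none : Option Int), (-1 : Int))
  if st.2.1 = -1 then none
  else
    match st.1, st.2.2.1 with
    | some lx, some ly => some (lx, st.2.1, ly, st.2.2.2)
    | _, _ => none

-- ===== PORT B =====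
def findBoundingCoordinates_alt (grid : List (List Int)) : Option (Int × Int × Int × Int) :=
  let m : Int := grid.length
  let n : Int := (PySem.List.pyGetD grid 0 []).length
  let coords := (PySem.List.pyRange 0 m 1).flatMap (fun i =>
      ((PySem.List.pyRange 0 n 1).filter (fun j =>
          decide (PySem.List.pyGetD (PySem.List.pyGetD grid i []) j 0 = 1))).map (fun j => (i, j)))
  if coords = [] then none
  else
    let rows := coords.map (·.1)
    let cols := coords.map (·.2)
    (PySem.List.min? rows (fun x => x)).bind (fun a =>
      (PySem.List.max? rows (fun x => x)).bind (fun b =>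
        (PySem.List.min? cols (fun x => x)).bind (fun c =>
          (PySem.List.max? cols (fun x => x)).map (fun d => (a, b, c, d)))))

-- ===== PRECONDITION & SPEC =====
-- Pre_ excludes exactly the inputs where Python A raises IndexError: the empty grid
-- (grid[0]) and grids in which some row is shorter than row 0 (grid[i][j], j < n).
def Pre_findBoundingCoordinates (grid : List (List Int)) : Prop :=
  grid ≠ [] ∧ ∀ row ∈ grid, (grid.headD []).length ≤ row.length
instance (grid : List (List Int)) : Decidable (Pre_findBoundingCoordinates grid) := by
  unfold Pre_findBoundingCoordinates; infer_instance

def pvWitness_findBoundingCoordinates : List (List Int) := [[0, 1], [1, 0]]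

def Spec_findBoundingCoordinates (grid : List (List Int)) (out : Option (Int × Int × Int × Int)) : Prop := out = findBoundingCoordinates_alt grid
instance (grid : List (List Int)) (out : Option (Int × Int × Int × Int)) : Decidable (Spec_findBoundingCoordinates grid out) := by unfold Spec_findBoundingCoordinates; infer_instance

-- ===== CLAIM (what is proved, stated in full; the proofs are below) =====
def Claim_equal_findBoundingCoordinates : Prop := ∀ (grid : List (List Int)), Dom_findBoundingCoordinates grid → Pre_findBoundingCoordinates grid → Spec_findBoundingCoordinates grid (findBoundingCoordinates grid)

-- ===== LEMMAS AND PROOFS =====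

-- proof-only helpers: the 1-coordinate list, the state update, and the two finishing steps
def fbcUpd (st : Option Int × Int × Option Int × Int) (p : Int × Int) :
    Option Int × Int × Option Int × Int :=
  (fbcMin st.1 p.1, max st.2.1 p.1, fbcMin st.2.2.1 p.2, max st.2.2.2 p.2)

def fbcCoords (grid : List (List Int)) : List (Int × Int) :=
  (PySem.List.pyRange 0 (grid.length : Int) 1).flatMap (fun i =>
      ((PySem.List.pyRange 0 ((PySem.List.pyGetD grid 0 []).length : Int) 1).filter (fun j =>
          decide (PySem.List.pyGetD (PySem.List.pyGetD grid i []) j 0 = 1))).map (fun j => (i, j)))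

def fbcFinish (st : Option Int × Int × Option Int × Int) : Option (Int × Int × Int × Int) :=
  if st.2.1 = -1 then none
  else
    match st.1, st.2.2.1 with
    | some lx, some ly => some (lx, st.2.1, ly, st.2.2.2)
    | _, _ => none

def fbcFinish' (coords : List (Int × Int)) : Option (Int × Int × Int × Int) :=
  if coords = [] then none
  else
    (PySem.List.min? (coords.map (·.1)) (fun x => x)).bind (fun a =>
      (PySem.List.max? (coords.map (·.1)) (fun x => x)).bind (fun b =>
        (PySem.List.min? (coords.map (·.2)) (fun x => x)).bind (fun c =>
          (PySem.List.max? (coords.map (·.2)) (fun x => x)).map (fun d => (a, b, c, d)))))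

theorem foldl_fbcMin_some (l : List Int) (x : Int) :
    l.foldl fbcMin (some x) = some (l.foldl min x) := by
  induction l generalizing x with
  | nil => rfl
  | cons a t ih => simp [fbcMin, ih]

theorem fbcF_fst (ps : List (Int × Int)) (st : Option Int × Int × Option Int × Int) :
    (ps.foldl fbcUpd st).1 = (ps.map (·.1)).foldl fbcMin st.1 := by
  induction ps generalizing st with
  | nil => rfl
  | cons p t ih => simp [fbcUpd, ih]

theorem fbcF_hx (ps : List (Int × Int)) (st : Option Int × Int × Option Int × Int) :
    (ps.foldl fbcUpd st).2.1 = (ps.map (·.1)).foldl max st.2.1 := by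
  induction ps generalizing st with
  | nil => rfl
  | cons p t ih => simp [fbcUpd, ih]

theorem fbcF_ly (ps : List (Int × Int)) (st : Option Int × Int × Option Int × Int) :
    (ps.foldl fbcUpd st).2.2.1 = (ps.map (·.2)).foldl fbcMin st.2.2.1 := by
  induction ps generalizing st with
  | nil => rfl
  | cons p t ih => simp [fbcUpd, ih]

theorem fbcF_hy (ps : List (Int × Int)) (st : Option Int × Int × Option Int × Int) :
    (ps.foldl fbcUpd st).2.2.2 = (ps.map (·.2)).foldl max st.2.2.2 := by
  induction ps generalizing st with
  | nil => rfl
  | cons p t ih => simp [fbcUpd, ih]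

theorem foldl_flatMap_fbc (l : List Int) (g : Int → List (Int × Int))
    (init : Option Int × Int × Option Int × Int) :
    l.foldl (fun st i => (g i).foldl fbcUpd st) init = (l.flatMap g).foldl fbcUpd init := by
  induction l generalizing init with
  | nil => rfl
  | cons a t ih => simp [List.flatMap_cons, List.foldl_append, ih]

theorem fbcA_fold (grid : List (List Int)) :
    (PySem.List.pyRange 0 (grid.length : Int) 1).foldl (fun st i =>
      (PySem.List.pyRange 0 ((PySem.List.pyGetD grid 0 []).length : Int) 1).foldl (fun st j =>
        if PySem.List.pyGetD (PySem.List.pyGetD grid i []) j 0 = 1 then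
          (fbcMin st.1 i, max st.2.1 i, fbcMin st.2.2.1 j, max st.2.2.2 j)
        else st) st)
      ((none : Option Int), (-1 : Int), (none : Option Int), (-1 : Int))
    = (fbcCoords grid).foldl fbcUpd ((none : Option Int), (-1 : Int), (none : Option Int), (-1 : Int)) := by
  rw [fbcCoords, ← foldl_flatMap_fbc]
  apply PySem.List.foldl_congr_mem
  intro st i _
  rw [List.foldl_map,
    PySem.List.foldl_ite_eq_foldl_filter
      (fun j => PySem.List.pyGetD (PySem.List.pyGetD grid i []) j 0 = 1)
      (fun st j => (fbcMin st.1 i, max st.2.1 i, fbcMin st.2.2.1 j, max st.2.2.2 j))]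
  rfl

theorem fbcA_norm (grid : List (List Int)) :
    findBoundingCoordinates grid
      = fbcFinish ((fbcCoords grid).foldl fbcUpd ((none : Option Int), (-1 : Int), (none : Option Int), (-1 : Int))) :=
  congrArg fbcFinish (fbcA_fold grid)

theorem fbcB_norm (grid : List (List Int)) :
    findBoundingCoordinates_alt grid = fbcFinish' (fbcCoords grid) := rfl

theorem fbcCoords_nonneg (grid : List (List Int)) : ∀ p ∈ fbcCoords grid, 0 ≤ p.1 ∧ 0 ≤ p.2 := by
  intro p hp
  rw [fbcCoords] at hp
  simp only [List.mem_flatMap, List.mem_map, List.mem_filter] at hp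
  obtain ⟨i, hi, j, hj, rfl⟩ := hp
  exact ⟨(PySem.List.mem_pyRange_one.mp hi).1, (PySem.List.mem_pyRange_one.mp hj.1).1⟩

theorem fbcFinish_eq (l : List (Int × Int)) (hl : ∀ p ∈ l, 0 ≤ p.1 ∧ 0 ≤ p.2) :
    fbcFinish (l.foldl fbcUpd ((none : Option Int), (-1 : Int), (none : Option Int), (-1 : Int)))
      = fbcFinish' l := by
  cases l with
  | nil => rfl
  | cons p t =>
    have hp := hl p List.mem_cons_self
    have h1 : ((p :: t).foldl fbcUpd ((none : Option Int), (-1 : Int), (none : Option Int), (-1 : Int))).1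
        = some ((t.map (·.1)).foldl min p.1) := by
      rw [fbcF_fst]
      simpa [fbcMin] using foldl_fbcMin_some (t.map (·.1)) p.1
    have h2 : ((p :: t).foldl fbcUpd ((none : Option Int), (-1 : Int), (none : Option Int), (-1 : Int))).2.1
        = (t.map (·.1)).foldl max p.1 := by
      rw [fbcF_hx]
      simp only [List.map_cons, List.foldl_cons]
      rw [max_eq_right (le_trans (by norm_num) hp.1)]
    have h3 : ((p :: t).foldl fbcUpd ((none : Option Int), (-1 : Int), (none : Option Int), (-1 : Int))).2.2.1
        = some ((t.map (·.2)).foldl min p.2) := by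
      rw [fbcF_ly]
      simpa [fbcMin] using foldl_fbcMin_some (t.map (·.2)) p.2
    have h4 : ((p :: t).foldl fbcUpd ((none : Option Int), (-1 : Int), (none : Option Int), (-1 : Int))).2.2.2
        = (t.map (·.2)).foldl max p.2 := by
      rw [fbcF_hy]
      simp only [List.map_cons, List.foldl_cons]
      rw [max_eq_right (le_trans (by norm_num) hp.2)]
    have hne : (t.map (·.1)).foldl max p.1 ≠ -1 := by
      have := (PySem.List.le_foldl_max (t.map (·.1)) p.1).1
      omega
    rw [fbcFinish, fbcFinish', h1, h2, h3, h4, if_neg hne, if_neg (List.cons_ne_nil p t)]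
    simp only [List.map_cons, PySem.List.min?_id_cons, PySem.List.max?_id_cons,
      Option.bind_some, Option.map_some]

-- ===== VERDICT (by name: the statement is the Claim_ definition above) =====
theorem findBoundingCoordinates_spec : Claim_equal_findBoundingCoordinates := by
  intro grid _ _
  unfold Spec_findBoundingCoordinates
  rw [fbcA_norm, fbcB_norm, fbcFinish_eq _ (fbcCoords_nonneg grid)]
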